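-- pv_equiv track=rewrite | github.com/siroba/tfg_bus_sitter | busDynamic.py | reshape_to_variable_rows
-- ===== SOURCE A (Python) =====
-- def reshape_to_variable_rows(flat_array, original_2d_array):
--     # get lengths of each row in the original 2d array
--     row_lengths = [len(row) for row in original_2d_array]
--
--     new_2d_array = []
--     i = 0  # start index for slicing flat_array
--     for length in row_lengths:
--         new_row = flat_array[i:i+length]
--         new_2d_array.append(new_row)
--         i += length  # move the start index to the end of the current slice
--
--     return new_2d_array
-- ===== SOURCE B (Python) =====
-- def reshape_to_variable_rows(flat_array, original_2d_array):
--     # Element-driven distribution: walk the flat elements once, appending each to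
--     # the row currently being filled, closing a row as soon as it reaches its
--     # capacity (and emitting the leftover / empty rows at the end).
--     caps = [len(row) for row in original_2d_array]
--     res = []
--     cur = []
--     k = 0  # index of the row currently being filled
--     for x in flat_array:
--         while k < len(caps) and len(cur) == caps[k]:
--             res.append(cur)
--             cur = []
--             k += 1
--         if k == len(caps):
--             break
--         cur.append(x)
--     while k < len(caps):
--         res.append(cur)
--         cur = []
--         k += 1
--     return res
-- ===== Notes on version B (the rewrite author's own statement) =====
-- stated objective: alternative
-- what changed: B iterates over the flat ELEMENTS (not the rows), appending each element to the row currently being filled and closing a row when it reaches its capacity, instead of A's loop over rows that slices flat_array at a running start index.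
import Mathlib
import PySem

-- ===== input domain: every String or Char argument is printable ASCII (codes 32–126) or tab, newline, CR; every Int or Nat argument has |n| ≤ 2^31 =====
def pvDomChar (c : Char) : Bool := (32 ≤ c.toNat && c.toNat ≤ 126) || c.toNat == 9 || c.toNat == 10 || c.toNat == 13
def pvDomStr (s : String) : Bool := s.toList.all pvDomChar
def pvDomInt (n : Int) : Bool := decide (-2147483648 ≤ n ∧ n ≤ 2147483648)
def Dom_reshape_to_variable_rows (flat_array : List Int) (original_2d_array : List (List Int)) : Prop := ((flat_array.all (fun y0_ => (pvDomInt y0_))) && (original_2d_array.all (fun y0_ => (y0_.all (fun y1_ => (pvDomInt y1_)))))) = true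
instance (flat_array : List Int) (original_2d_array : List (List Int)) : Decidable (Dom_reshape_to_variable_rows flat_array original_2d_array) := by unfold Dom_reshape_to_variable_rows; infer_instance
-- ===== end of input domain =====

-- B distributes the flat elements one by one into rows (closing a row when it reaches
-- its capacity), instead of A's per-row slicing at a running start index; same cost.

-- ===== PORT A =====
-- A: row_lengths comprehension, then one loop appending flat_array[i:i+length] while advancing i.
def reshape_to_variable_rows (flat_array : List Int) (original_2d_array : List (List Int)) : List (List Int) :=
  let row_lengths : List Int := original_2d_array.map (fun row => (row.length : Int))
  (row_lengths.foldl
    (fun (st : List (List Int) × Int) length =>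
      (st.1 ++ [PySem.List.slice flat_array (some st.2) (some (st.2 + length))], st.2 + length))
    ([], 0)).1

-- ===== PORT B =====
-- B's inner `while k < len(caps) and len(cur) == caps[k]: res.append(cur); cur = []; k += 1`
-- (terminates because caps.length - k decreases)
def pvClose (caps : List Nat) (res : List (List Int)) (cur : List Int) (k : Nat) :
    List (List Int) × List Int × Nat :=
  if k < caps.length then
    if cur.length = caps.getD k 0 then pvClose caps (res ++ [cur]) [] (k + 1)
    else (res, cur, k)
  else (res, cur, k)
termination_by caps.length - k

-- B's trailing `while k < len(caps): res.append(cur); cur = []; k += 1`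
def pvFlush (caps : List Nat) (res : List (List Int)) (cur : List Int) (k : Nat) :
    List (List Int) :=
  if k < caps.length then pvFlush caps (res ++ [cur]) [] (k + 1)
  else res
termination_by caps.length - k

-- B's `for x in flat_array` loop (with the break) followed by the trailing while
def pvGo (caps : List Nat) : List Int → List (List Int) → List Int → Nat → List (List Int)
  | [], res, cur, k => pvFlush caps res cur k
  | x :: xs, res, cur, k =>
    let st := pvClose caps res cur k
    if st.2.2 = caps.length then st.1
    else pvGo caps xs st.1 (st.2.1 ++ [x]) st.2.2

-- B: caps = row lengths; distribute flat_array's elements into rows of those capacities.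
def reshape_to_variable_rows_alt (flat_array : List Int) (original_2d_array : List (List Int)) : List (List Int) :=
  let caps := original_2d_array.map (fun row => row.length)
  pvGo caps flat_array [] [] 0

-- ===== PRECONDITION & SPEC =====
def Spec_reshape_to_variable_rows (flat_array : List Int) (original_2d_array : List (List Int)) (out : List (List Int)) : Prop := out = reshape_to_variable_rows_alt flat_array original_2d_array
instance (flat_array : List Int) (original_2d_array : List (List Int)) (out : List (List Int)) : Decidable (Spec_reshape_to_variable_rows flat_array original_2d_array out) := by unfold Spec_reshape_to_variable_rows; infer_instance

-- ===== CLAIM (what is proved, stated in full; the proofs are below) =====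
def Claim_equal_reshape_to_variable_rows : Prop := ∀ (flat_array : List Int) (original_2d_array : List (List Int)), Dom_reshape_to_variable_rows flat_array original_2d_array → Spec_reshape_to_variable_rows flat_array original_2d_array (reshape_to_variable_rows flat_array original_2d_array)

-- ===== LEMMAS AND PROOFS =====

-- the common value: consecutive chunks of xs sized by caps
def pvChunksN (xs : List Int) : List Nat → List (List Int)
  | [] => []
  | c :: cs => xs.take c :: pvChunksN (xs.drop c) cs

-- pure functional spec of B's element distribution
def pvFill : List Int → List Nat → List Int → List (List Int)
  | _, [], _ => []
  | cur, c :: cs, xs =>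
    if cur.length = c then cur :: pvFill [] cs xs
    else
      match xs with
      | [] => cur :: cs.map (fun _ => [])
      | x :: xs' => pvFill (cur ++ [x]) (c :: cs) xs'
termination_by _ caps xs => (caps.length, xs.length)

-- chunks of indexed A-style slicing
def pvChunks (flat : List Int) : Nat → List (List Int) → List (List Int)
  | _, [] => []
  | i, r :: rs => (flat.drop i).take r.length :: pvChunks flat (i + r.length) rs

theorem pvA_fold (flat : List Int) :
    ∀ (orig : List (List Int)) (acc : List (List Int)) (n : Nat),
      ((orig.map (fun row => ((row.length : Int)))).foldl
        (fun (st : List (List Int) × Int) length =>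
          (st.1 ++ [PySem.List.slice flat (some st.2) (some (st.2 + length))], st.2 + length))
        (acc, (n : Int))).1 = acc ++ pvChunks flat n orig := by
  intro orig
  induction orig with
  | nil => intro acc n; simp [pvChunks]
  | cons r rs ih =>
    intro acc n
    simp only [List.map_cons, List.foldl_cons]
    rw [show ((n : Int) + (r.length : Int)) = ((n + r.length : Nat) : Int) by push_cast; ring]
    rw [ih (acc ++ [PySem.List.slice flat (some (n : Int)) (some ((n + r.length : Nat) : Int))]) (n + r.length)]
    rw [show ((n + r.length : Nat) : Int) = ((n : Int) + (r.length : Int)) by push_cast; ring]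
    rw [PySem.List.slice_natCast_add]
    simp [pvChunks]

theorem pvChunks_eq_chunksN (flat : List Int) :
    ∀ (orig : List (List Int)) (n : Nat),
      pvChunks flat n orig = pvChunksN (flat.drop n) (orig.map (fun r => r.length)) := by
  intro orig
  induction orig with
  | nil => intro n; simp [pvChunks, pvChunksN]
  | cons r rs ih =>
    intro n
    simp only [pvChunks, List.map_cons, pvChunksN, ih (n + r.length)]
    congr 2
    rw [List.drop_drop]

theorem pvChunksN_nil : ∀ (cs : List Nat), pvChunksN [] cs = cs.map (fun _ => ([] : List Int)) := by
  intro cs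
  induction cs with
  | nil => simp [pvChunksN]
  | cons c cs ih => simp [pvChunksN, ih]

theorem pvFlush_empty (caps : List Nat) :
    ∀ (m k : Nat), caps.length - k = m → ∀ (res : List (List Int)),
      pvFlush caps res [] k = res ++ (caps.drop k).map (fun _ => ([] : List Int)) := by
  intro m
  induction m with
  | zero =>
    intro k h res
    rw [pvFlush]
    have hk : ¬ k < caps.length := by omega
    simp [hk, List.drop_eq_nil_of_le (show caps.length ≤ k by omega)]
  | succ m ih =>
    intro k h res
    have hk : k < caps.length := by omega
    rw [pvFlush]
    simp only [hk, if_true]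
    rw [ih (k + 1) (by omega) (res ++ [[]])]
    rw [List.drop_eq_getElem_cons hk]
    simp [show caps.length - k = (caps.length - (k + 1)) + 1 from by omega, List.replicate_succ]

theorem pvFill_nil_nil : ∀ (cs : List Nat), pvFill [] cs [] = cs.map (fun _ => ([] : List Int)) := by
  intro cs
  induction cs with
  | nil => simp [pvFill]
  | cons c cs ih =>
    by_cases h : c = 0
    · simp [pvFill, h, ih]
    · simp [pvFill, Ne.symm h]

theorem pvGo_past (caps : List Nat) :
    ∀ (xs : List Int) (res : List (List Int)) (cur : List Int) (k : Nat), caps.length ≤ k →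
      pvGo caps xs res cur k = res := by
  intro xs
  induction xs with
  | nil =>
    intro res cur k hk
    simp only [pvGo]
    rw [pvFlush]
    simp [Nat.not_lt.mpr hk]
  | cons x xs ih =>
    intro res cur k hk
    simp only [pvGo]
    rw [pvClose]
    simp only [Nat.not_lt.mpr hk, if_false]
    by_cases h : k = caps.length
    · simp [h]
    · simp [h, ih res (cur ++ [x]) k hk]

theorem pvGo_eq_fill (caps : List Nat) :
    ∀ (cur : List Int) (capsD : List Nat) (xs : List Int),
      ∀ (res : List (List Int)) (k : Nat), capsD = caps.drop k →
      pvGo caps xs res cur k = res ++ pvFill cur capsD xs := by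
  intro cur capsD xs
  induction cur, capsD, xs using pvFill.induct with
  | case1 cur xs =>
    intro res k hk
    have hk' : caps.length ≤ k := List.drop_eq_nil_iff.mp hk.symm
    rw [pvGo_past caps xs res cur k hk']
    simp [pvFill]
  | case2 cur cs xs ih =>
    intro res k hk
    have hklt : k < caps.length := by
      by_contra hc
      rw [List.drop_eq_nil_of_le (Nat.le_of_not_lt hc)] at hk
      simp at hk
    rw [List.drop_eq_getElem_cons hklt] at hk
    injection hk with h1 h2
    have hgetD : caps.getD k 0 = caps[k] := List.getD_eq_getElem caps 0 hklt
    have hA : pvGo caps xs res cur k = pvGo caps xs (res ++ [cur]) [] (k + 1) := by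
      cases xs with
      | nil =>
        simp only [pvGo]
        conv_lhs => rw [pvFlush]
        simp [hklt]
      | cons x xs' =>
        simp only [pvGo]
        have hcl : pvClose caps res cur k = pvClose caps (res ++ [cur]) [] (k + 1) := by
          conv_lhs => rw [pvClose]
          simp [hklt, h1]
        rw [hcl]
    rw [hA, ih (res ++ [cur]) (k + 1) h2]
    have hfill : pvFill cur (cur.length :: cs) xs = cur :: pvFill [] cs xs := by
      conv_lhs => rw [pvFill.eq_def]
      simp
    rw [hfill]
    simp [List.append_assoc]
  | case3 cur c cs hne =>
    intro res k hk
    have hklt : k < caps.length := by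
      by_contra hc
      rw [List.drop_eq_nil_of_le (Nat.le_of_not_lt hc)] at hk
      simp at hk
    rw [List.drop_eq_getElem_cons hklt] at hk
    injection hk with h1 h2
    simp only [pvGo]
    rw [pvFlush]
    simp only [hklt, if_true]
    rw [pvFlush_empty caps (caps.length - (k + 1)) (k + 1) rfl (res ++ [cur])]
    simp [pvFill, hne, ← h2, List.append_assoc]
  | case4 cur c cs hne x xs' ih =>
    intro res k hk
    have hklt : k < caps.length := by
      by_contra hc
      rw [List.drop_eq_nil_of_le (Nat.le_of_not_lt hc)] at hk
      simp at hk
    have hkcons := List.drop_eq_getElem_cons hklt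
    rw [hkcons] at hk
    injection hk with h1 h2
    have hgetD : caps.getD k 0 = caps[k] := List.getD_eq_getElem caps 0 hklt
    simp only [pvGo]
    have hcl : pvClose caps res cur k = (res, cur, k) := by
      rw [pvClose]
      have hne' : ¬ cur.length = caps[k] := h1 ▸ hne
      simp [hklt, hne']
    rw [hcl]
    simp only
    have hkne : ¬ (k = caps.length) := by omega
    simp only [hkne, if_false]
    rw [ih res k (by rw [hkcons, ← h1, ← h2])]
    conv_rhs => rw [pvFill]
    simp [hne]

theorem pvFill_eq_chunksN :
    ∀ (caps : List Nat) (xs : List Int), pvFill [] caps xs = pvChunksN xs caps := by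
  intro caps
  induction caps with
  | nil => intro xs; simp [pvFill, pvChunksN]
  | cons c cs ih =>
    intro xs
    have Q : ∀ (xs : List Int) (cur : List Int), cur.length ≤ c →
        pvFill cur (c :: cs) xs
          = (cur ++ xs.take (c - cur.length)) :: pvChunksN (xs.drop (c - cur.length)) cs := by
      intro xs
      induction xs with
      | nil =>
        intro cur hc
        by_cases h : cur.length = c
        · simp [pvFill, ← h, pvFill_nil_nil, pvChunksN_nil]
        · simp [pvFill, h, pvChunksN_nil]
      | cons x xs ihx =>
        intro cur hc
        by_cases h : cur.length = c
        · rw [pvFill]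
          simp only [h, if_true]
          rw [ih]
          simp
        · have hlt : cur.length < c := lt_of_le_of_ne hc h
          rw [pvFill]
          simp only [h, if_false]
          rw [ihx (cur ++ [x]) (by simp; omega)]
          have hone : c - cur.length = (c - (cur ++ [x]).length) + 1 := by simp; omega
          rw [hone, List.take_succ_cons, List.drop_succ_cons]
          simp [List.append_assoc]
    have h0 := Q xs [] (Nat.zero_le c)
    simpa [pvChunksN] using h0

-- ===== VERDICT (by name: the statement is the Claim_ definition above) =====
theorem reshape_to_variable_rows_spec : Claim_equal_reshape_to_variable_rows := by
  intro flat orig _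
  unfold Spec_reshape_to_variable_rows reshape_to_variable_rows reshape_to_variable_rows_alt
  have hA := pvA_fold flat orig [] 0
  simp only [Nat.cast_zero] at hA
  simp only [hA, List.nil_append]
  rw [pvChunks_eq_chunksN, List.drop_zero]
  rw [pvGo_eq_fill (orig.map (fun r => r.length)) [] (orig.map (fun r => r.length)) flat [] 0 (by simp)]
  rw [pvFill_eq_chunksN]
  rfl
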